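-- pv_equiv track=rewrite | github.com/randomtruffles/Dominion_League | parsing/generate_division_divs.py | figure_div
-- ===== SOURCE A (Python) =====
-- div_id = ["divA", "divB", "divC", "divD", "divE", "divF", "divG", "divH"]
--
-- div_count = [1, 2, 4, 4, 8, 16, 32, 64]
--
-- def figure_div (idx):
--     fit = 0
--     for i, c in enumerate(div_count):
--         fit += c
--         if idx <= fit:
--             return div_id[i]
--         c -= 1
--     return div_id[-1]
-- ===== SOURCE B (Python) =====
-- div_id = ["divA", "divB", "divC", "divD", "divE", "divF", "divG", "divH"]
--
-- thresholds = [1, 3, 7, 11, 19, 35, 67, 131]  # cumulative sums of div_count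
--
-- def figure_div(idx):
--     # binary search (bisect_left) over precomputed cumulative thresholds
--     lo, hi = 0, len(thresholds)
--     while lo < hi:
--         mid = (lo + hi) // 2
--         if thresholds[mid] < idx:
--             lo = mid + 1
--         else:
--             hi = mid
--     return div_id[min(lo, len(div_id) - 1)]
-- ===== Notes on version B (the rewrite author's own statement) =====
-- stated objective: alternative
-- what changed: Replaced the linear accumulate-and-scan over div_count with a bisect_left-style binary search over a precomputed list of cumulative thresholds, clamped to the last division.
import Mathlib
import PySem

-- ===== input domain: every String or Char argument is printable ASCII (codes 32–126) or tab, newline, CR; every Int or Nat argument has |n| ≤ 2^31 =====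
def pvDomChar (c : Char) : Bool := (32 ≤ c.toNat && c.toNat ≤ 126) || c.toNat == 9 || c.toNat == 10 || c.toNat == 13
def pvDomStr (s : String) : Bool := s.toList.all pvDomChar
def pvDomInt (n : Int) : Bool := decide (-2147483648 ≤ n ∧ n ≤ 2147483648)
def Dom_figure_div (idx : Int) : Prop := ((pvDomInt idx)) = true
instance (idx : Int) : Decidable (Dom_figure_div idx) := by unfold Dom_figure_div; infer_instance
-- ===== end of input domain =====

-- B replaces A's linear accumulate-and-scan with a binary search over precomputed cumulative thresholds (alternative algorithm, same result).

-- ===== PORT A =====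
def pvDivId : List String := ["divA", "divB", "divC", "divD", "divE", "divF", "divG", "divH"]

def pvDivCount : List Int := [1, 2, 4, 4, 8, 16, 32, 64]

-- the for-loop over enumerate(div_count) with early return
def pvFigLoop (idx : Int) (fit : Int) : List (Int × Int) → Option String
  | [] => none
  | (i, c) :: rest =>
    let fit' := fit + c
    if idx ≤ fit' then PySem.List.pyGet? pvDivId i else pvFigLoop idx fit' rest

def figure_div (idx : Int) : String :=
  match pvFigLoop idx 0 (PySem.List.enumerate pvDivCount) with
  | some s => s
  | none => (PySem.List.pyGet? pvDivId (-1)).getD ""   -- div_id[-1]; never out of range here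

-- ===== PORT B =====
def pvThresholds : List Int := [1, 3, 7, 11, 19, 35, 67, 131]

-- hand-written bisect_left loop, as in Source B
def pvBisectLeft (xs : List Int) (x : Int) (lo hi : Nat) : Nat :=
  if _h : lo < hi then
    let mid := (lo + hi) / 2
    if xs.getD mid 0 < x then pvBisectLeft xs x (mid + 1) hi
    else pvBisectLeft xs x lo mid
  else lo
termination_by hi - lo
decreasing_by all_goals omega

def figure_div_alt (idx : Int) : String :=
  let lo := pvBisectLeft pvThresholds idx 0 pvThresholds.length
  (PySem.List.pyGet? pvDivId (Int.ofNat (min lo (pvDivId.length - 1)))).getD ""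

-- ===== PRECONDITION & SPEC =====
def Spec_figure_div (idx : Int) (out : String) : Prop := out = figure_div_alt idx
instance (idx : Int) (out : String) : Decidable (Spec_figure_div idx out) := by unfold Spec_figure_div; infer_instance

-- ===== CLAIM (what is proved, stated in full; the proofs are below) =====
def Claim_equal_figure_div : Prop := ∀ (idx : Int), Dom_figure_div idx → Spec_figure_div idx (figure_div idx)

-- ===== LEMMAS AND PROOFS =====

theorem bl_step (xs : List Int) (x : Int) (lo hi : Nat) (h : lo < hi) :
    pvBisectLeft xs x lo hi =
      if xs.getD ((lo + hi) / 2) 0 < x then pvBisectLeft xs x ((lo + hi) / 2 + 1) hi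
      else pvBisectLeft xs x lo ((lo + hi) / 2) := by
  rw [pvBisectLeft]; simp [h]

theorem bl_base (xs : List Int) (x : Int) (lo : Nat) : pvBisectLeft xs x lo lo = lo := by
  rw [pvBisectLeft]; simp

theorem pvBl0 (idx : Int) (h2 : idx ≤ 1) :
    pvBisectLeft pvThresholds idx 0 8 = 0 := by
  rw [bl_step _ _ _ _ (by norm_num)]; norm_num [pvThresholds]
  rw [if_neg (by omega)]
  rw [bl_step _ _ _ _ (by norm_num)]; norm_num [pvThresholds]
  rw [if_neg (by omega)]
  rw [bl_step _ _ _ _ (by norm_num)]; norm_num [pvThresholds]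
  rw [if_neg (by omega)]
  rw [bl_step _ _ _ _ (by norm_num)]; norm_num [pvThresholds]
  rw [if_neg (by omega)]
  exact bl_base _ _ _

theorem pvBl1 (idx : Int) (h1 : 1 < idx) (h2 : idx ≤ 3) :
    pvBisectLeft pvThresholds idx 0 8 = 1 := by
  rw [bl_step _ _ _ _ (by norm_num)]; norm_num [pvThresholds]
  rw [if_neg (by omega)]
  rw [bl_step _ _ _ _ (by norm_num)]; norm_num [pvThresholds]
  rw [if_neg (by omega)]
  rw [bl_step _ _ _ _ (by norm_num)]; norm_num [pvThresholds]
  rw [if_neg (by omega)]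
  rw [bl_step _ _ _ _ (by norm_num)]; norm_num [pvThresholds]
  rw [if_pos (by omega)]
  exact bl_base _ _ _

theorem pvBl2 (idx : Int) (h1 : 3 < idx) (h2 : idx ≤ 7) :
    pvBisectLeft pvThresholds idx 0 8 = 2 := by
  rw [bl_step _ _ _ _ (by norm_num)]; norm_num [pvThresholds]
  rw [if_neg (by omega)]
  rw [bl_step _ _ _ _ (by norm_num)]; norm_num [pvThresholds]
  rw [if_neg (by omega)]
  rw [bl_step _ _ _ _ (by norm_num)]; norm_num [pvThresholds]
  rw [if_pos (by omega)]
  exact bl_base _ _ _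

theorem pvBl3 (idx : Int) (h1 : 7 < idx) (h2 : idx ≤ 11) :
    pvBisectLeft pvThresholds idx 0 8 = 3 := by
  rw [bl_step _ _ _ _ (by norm_num)]; norm_num [pvThresholds]
  rw [if_neg (by omega)]
  rw [bl_step _ _ _ _ (by norm_num)]; norm_num [pvThresholds]
  rw [if_pos (by omega)]
  rw [bl_step _ _ _ _ (by norm_num)]; norm_num [pvThresholds]
  rw [if_neg (by omega)]
  exact bl_base _ _ _

theorem pvBl4 (idx : Int) (h1 : 11 < idx) (h2 : idx ≤ 19) :
    pvBisectLeft pvThresholds idx 0 8 = 4 := by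
  rw [bl_step _ _ _ _ (by norm_num)]; norm_num [pvThresholds]
  rw [if_neg (by omega)]
  rw [bl_step _ _ _ _ (by norm_num)]; norm_num [pvThresholds]
  rw [if_pos (by omega)]
  rw [bl_step _ _ _ _ (by norm_num)]; norm_num [pvThresholds]
  rw [if_pos (by omega)]
  exact bl_base _ _ _

theorem pvBl5 (idx : Int) (h1 : 19 < idx) (h2 : idx ≤ 35) :
    pvBisectLeft pvThresholds idx 0 8 = 5 := by
  rw [bl_step _ _ _ _ (by norm_num)]; norm_num [pvThresholds]
  rw [if_pos (by omega)]
  rw [bl_step _ _ _ _ (by norm_num)]; norm_num [pvThresholds]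
  rw [if_neg (by omega)]
  rw [bl_step _ _ _ _ (by norm_num)]; norm_num [pvThresholds]
  rw [if_neg (by omega)]
  exact bl_base _ _ _

theorem pvBl6 (idx : Int) (h1 : 35 < idx) (h2 : idx ≤ 67) :
    pvBisectLeft pvThresholds idx 0 8 = 6 := by
  rw [bl_step _ _ _ _ (by norm_num)]; norm_num [pvThresholds]
  rw [if_pos (by omega)]
  rw [bl_step _ _ _ _ (by norm_num)]; norm_num [pvThresholds]
  rw [if_neg (by omega)]
  rw [bl_step _ _ _ _ (by norm_num)]; norm_num [pvThresholds]
  rw [if_pos (by omega)]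
  exact bl_base _ _ _

theorem pvBl7 (idx : Int) (h1 : 67 < idx) (h2 : idx ≤ 131) :
    pvBisectLeft pvThresholds idx 0 8 = 7 := by
  rw [bl_step _ _ _ _ (by norm_num)]; norm_num [pvThresholds]
  rw [if_pos (by omega)]
  rw [bl_step _ _ _ _ (by norm_num)]; norm_num [pvThresholds]
  rw [if_pos (by omega)]
  rw [bl_step _ _ _ _ (by norm_num)]; norm_num [pvThresholds]
  rw [if_neg (by omega)]
  exact bl_base _ _ _

theorem pvBl8 (idx : Int) (h1 : 131 < idx) :
    pvBisectLeft pvThresholds idx 0 8 = 8 := by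
  rw [bl_step _ _ _ _ (by norm_num)]; norm_num [pvThresholds]
  rw [if_pos (by omega)]
  rw [bl_step _ _ _ _ (by norm_num)]; norm_num [pvThresholds]
  rw [if_pos (by omega)]
  rw [bl_step _ _ _ _ (by norm_num)]; norm_num [pvThresholds]
  rw [if_pos (by omega)]
  exact bl_base _ _ _

theorem figure_div_cases (idx : Int) :
    figure_div idx =
      if idx ≤ 1 then "divA" else if idx ≤ 3 then "divB" else if idx ≤ 7 then "divC"
      else if idx ≤ 11 then "divD" else if idx ≤ 19 then "divE" else if idx ≤ 35 then "divF"
      else if idx ≤ 67 then "divG" else "divH" := by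
  simp only [figure_div, pvFigLoop, pvDivCount, pvDivId, PySem.List.enumerate,
    PySem.List.pyGet?, PySem.List.pyIdx?]
  norm_num
  split_ifs <;> rfl

theorem figure_div_alt_cases (idx : Int) :
    figure_div_alt idx =
      if idx ≤ 1 then "divA" else if idx ≤ 3 then "divB" else if idx ≤ 7 then "divC"
      else if idx ≤ 11 then "divD" else if idx ≤ 19 then "divE" else if idx ≤ 35 then "divF"
      else if idx ≤ 67 then "divG" else "divH" := by
  have hlen : pvThresholds.length = 8 := by norm_num [pvThresholds]
  unfold figure_div_alt
  rw [hlen]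
  by_cases h1 : idx ≤ 1
  · rw [pvBl0 idx h1, if_pos h1]; rfl
  by_cases h2 : idx ≤ 3
  · rw [pvBl1 idx (by omega) h2, if_neg h1, if_pos h2]; rfl
  by_cases h3 : idx ≤ 7
  · rw [pvBl2 idx (by omega) h3, if_neg h1, if_neg h2, if_pos h3]; rfl
  by_cases h4 : idx ≤ 11
  · rw [pvBl3 idx (by omega) h4, if_neg h1, if_neg h2, if_neg h3, if_pos h4]; rfl
  by_cases h5 : idx ≤ 19
  · rw [pvBl4 idx (by omega) h5, if_neg h1, if_neg h2, if_neg h3, if_neg h4, if_pos h5]; rfl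
  by_cases h6 : idx ≤ 35
  · rw [pvBl5 idx (by omega) h6, if_neg h1, if_neg h2, if_neg h3, if_neg h4, if_neg h5, if_pos h6]; rfl
  by_cases h7 : idx ≤ 67
  · rw [pvBl6 idx (by omega) h7, if_neg h1, if_neg h2, if_neg h3, if_neg h4, if_neg h5, if_neg h6, if_pos h7]; rfl
  by_cases h8 : idx ≤ 131
  · rw [pvBl7 idx (by omega) h8, if_neg h1, if_neg h2, if_neg h3, if_neg h4, if_neg h5, if_neg h6, if_neg h7]; rfl
  · rw [pvBl8 idx (by omega), if_neg h1, if_neg h2, if_neg h3, if_neg h4, if_neg h5, if_neg h6, if_neg h7]; rfl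

-- ===== VERDICT (by name: the statement is the Claim_ definition above) =====
theorem figure_div_spec : Claim_equal_figure_div := by
  intro idx _
  unfold Spec_figure_div
  rw [figure_div_cases, figure_div_alt_cases]
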